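-- pv_equiv track=rewrite | github.com/MrBrantCode/unitest_baseline | mut_generate/mist_train_cf/cf_53975/solution.py | longest_names_lengths
-- ===== SOURCE A (Python) =====
-- def longest_names_lengths(names):
--     if not names:
--         return [], "The list is empty."
--
--     lengths = [len(name) for name in names]
--     max_length = max(lengths)
--     longest_names = [name for name in names if len(name) == max_length]
--
--     if len(longest_names) > 1:
--         result = "The longest names are " + ", ".join(longest_names) + " with a length of " + str(max_length) + "."
--     else:
--         result = "The longest name is " + longest_names[0] + " with a length of " + str(max_length) + "."
--
--     return lengths, result
-- ===== SOURCE B (Python) =====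
-- def longest_names_lengths(names):
--     if not names:
--         return [], "The list is empty."
--
--     lengths = []
--     max_length = -1
--     longest_names = []
--     for name in names:
--         n = len(name)
--         lengths.append(n)
--         if n > max_length:
--             max_length = n
--             longest_names = [name]
--         elif n == max_length:
--             longest_names.append(name)
--
--     if len(longest_names) > 1:
--         result = "The longest names are " + ", ".join(longest_names) + " with a length of " + str(max_length) + "."
--     else:
--         result = "The longest name is " + longest_names[0] + " with a length of " + str(max_length) + "."
--
--     return lengths, result
-- ===== Notes on version B (the rewrite author's own statement) =====
-- stated objective: alternative
-- what changed: Replaces A's three separate passes (a length comprehension, max(), and a filter comprehension) with one fused loop that carries a running maximum and resets/extends the longest-names accumulator.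
import Mathlib
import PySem

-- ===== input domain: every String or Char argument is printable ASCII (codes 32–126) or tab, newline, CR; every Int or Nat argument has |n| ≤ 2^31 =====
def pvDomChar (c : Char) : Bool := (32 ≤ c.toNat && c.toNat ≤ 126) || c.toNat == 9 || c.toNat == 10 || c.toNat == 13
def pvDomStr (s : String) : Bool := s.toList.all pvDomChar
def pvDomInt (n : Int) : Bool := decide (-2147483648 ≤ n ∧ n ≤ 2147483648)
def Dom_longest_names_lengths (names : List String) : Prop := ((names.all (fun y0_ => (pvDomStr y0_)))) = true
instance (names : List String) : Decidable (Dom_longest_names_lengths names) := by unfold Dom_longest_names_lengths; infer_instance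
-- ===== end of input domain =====

-- B fuses A's three passes (lengths comprehension, max(), filter comprehension) into one
-- running-max loop with an accumulator that resets on a new maximum; same results, alternative structure.

-- ===== PORT A =====
def longest_names_lengths (names : List String) : List Int × String :=
  if names = [] then ([], "The list is empty.")
  else
    let lengths := names.map (fun name => PySem.Str.len name)
    -- totality guard: lengths ≠ [] here, so max? is some; .getD 0 is never taken
    let max_length := (PySem.List.max? lengths (fun y => y)).getD 0
    let longest_names := names.filter (fun name => PySem.Str.len name == max_length)
    if longest_names.length > 1 then
      (lengths, "The longest names are " ++ PySem.Str.join ", " longest_names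
        ++ " with a length of " ++ PySem.Int.toStr max_length ++ ".")
    else
      -- totality guard: longest_names ≠ [] here, so element 0 exists
      (lengths, "The longest name is " ++ ((PySem.List.pyGet? longest_names 0).getD "")
        ++ " with a length of " ++ PySem.Int.toStr max_length ++ ".")

-- ===== PORT B =====
-- loop body of B's single pass: state = (lengths so far, running max, current longest names)
def lnlStep (st : List Int × Int × List String) (name : String) : List Int × Int × List String :=
  let n := PySem.Str.len name
  let lengths := st.1 ++ [n]
  if n > st.2.1 then (lengths, n, [name])
  else if n = st.2.1 then (lengths, st.2.1, st.2.2 ++ [name])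
  else (lengths, st.2.1, st.2.2)

def longest_names_lengths_alt (names : List String) : List Int × String :=
  if names = [] then ([], "The list is empty.")
  else
    let st := names.foldl lnlStep ([], -1, [])
    let lengths := st.1
    let max_length := st.2.1
    let longest_names := st.2.2
    if longest_names.length > 1 then
      (lengths, "The longest names are " ++ PySem.Str.join ", " longest_names
        ++ " with a length of " ++ PySem.Int.toStr max_length ++ ".")
    else
      (lengths, "The longest name is " ++ ((PySem.List.pyGet? longest_names 0).getD "")
        ++ " with a length of " ++ PySem.Int.toStr max_length ++ ".")

-- ===== PRECONDITION & SPEC =====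
def Spec_longest_names_lengths (names : List String) (out : List Int × String) : Prop := out = longest_names_lengths_alt names
instance (names : List String) (out : List Int × String) : Decidable (Spec_longest_names_lengths names out) := by unfold Spec_longest_names_lengths; infer_instance

-- ===== CLAIM (what is proved, stated in full; the proofs are below) =====
def Claim_equal_longest_names_lengths : Prop := ∀ (names : List String), Dom_longest_names_lengths names → Spec_longest_names_lengths names (longest_names_lengths names)

-- ===== LEMMAS AND PROOFS =====

-- characterisation of B's single pass from an arbitrary state
theorem lnl_loop (names : List String) (lengths : List Int) (m : Int) (longest : List String) :
    names.foldl lnlStep (lengths, m, longest) =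
      (lengths ++ names.map (fun n => PySem.Str.len n),
       names.foldl (fun acc n => max acc (PySem.Str.len n)) m,
       if names.foldl (fun acc n => max acc (PySem.Str.len n)) m = m
       then longest ++ names.filter (fun n => PySem.Str.len n == m)
       else names.filter (fun n =>
         PySem.Str.len n == names.foldl (fun acc n => max acc (PySem.Str.len n)) m)) := by
  induction names generalizing lengths m longest with
  | nil => simp
  | cons hd tl ih =>
    have hle : ∀ a : Int, a ≤ tl.foldl (fun acc n => max acc (PySem.Str.len n)) a :=
      fun a => (PySem.List.le_foldl_max_int tl _ a).1
    simp only [List.foldl_cons, List.map_cons, List.filter_cons]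
    generalize hL : PySem.Str.len hd = L
    rcases lt_trichotomy m L with h1 | h2 | h3
    · have hstep : lnlStep (lengths, m, longest) hd = (lengths ++ [L], L, [hd]) := by
        dsimp only [lnlStep]; rw [hL, if_pos h1]
      rw [hstep, ih, max_eq_right h1.le]
      have hMne : tl.foldl (fun acc n => max acc (PySem.Str.len n)) L ≠ m := by
        have := hle L; omega
      rw [if_neg hMne]
      by_cases hML : tl.foldl (fun acc n => max acc (PySem.Str.len n)) L = L
      · rw [if_pos hML, if_pos (by simp only [beq_iff_eq]; exact hML.symm), hML]
        simp
      · rw [if_neg hML, if_neg (by simp only [beq_iff_eq]; exact fun h => hML h.symm)]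
        simp
    · have hstep : lnlStep (lengths, m, longest) hd = (lengths ++ [L], m, longest ++ [hd]) := by
        dsimp only [lnlStep]; rw [hL, if_neg (by omega), if_pos h2.symm]
      rw [hstep, ih, max_eq_left h2.ge]
      by_cases hMm : tl.foldl (fun acc n => max acc (PySem.Str.len n)) m = m
      · rw [if_pos hMm, if_pos hMm, if_pos (by simp only [beq_iff_eq]; exact h2.symm)]
        simp
      · rw [if_neg hMm, if_neg hMm,
          if_neg (by simp only [beq_iff_eq]; exact fun h => hMm (by rw [← h]; exact h2.symm))]
        simp
    · have hstep : lnlStep (lengths, m, longest) hd = (lengths ++ [L], m, longest) := by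
        dsimp only [lnlStep]; rw [hL, if_neg (by omega), if_neg (by omega)]
      rw [hstep, ih, max_eq_left h3.le]
      have hneM : L ≠ tl.foldl (fun acc n => max acc (PySem.Str.len n)) m := by
        have := hle m; omega
      by_cases hMm : tl.foldl (fun acc n => max acc (PySem.Str.len n)) m = m
      · rw [if_pos hMm, if_pos hMm, if_neg (by simp only [beq_iff_eq]; omega)]
        simp
      · rw [if_neg hMm, if_neg hMm, if_neg (by simp only [beq_iff_eq]; exact hneM)]
        simp

theorem longest_names_lengths_spec : Claim_equal_longest_names_lengths := by
  intro names _
  unfold Spec_longest_names_lengths longest_names_lengths longest_names_lengths_alt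
  cases names with
  | nil => rfl
  | cons hd tl =>
    have hhd : (0 : Int) ≤ PySem.Str.len hd := by
      rw [PySem.Str.len_eq]; exact Int.natCast_nonneg _
    have hM0 : (hd :: tl).foldl (fun acc n => max acc (PySem.Str.len n)) (-1)
        = tl.foldl (fun acc n => max acc (PySem.Str.len n)) (PySem.Str.len hd) := by
      simp only [List.foldl_cons]
      rw [max_eq_right (by omega)]
    have hmaxA : (PySem.List.max? ((hd :: tl).map (fun name => PySem.Str.len name))
          (fun y => y)).getD 0
        = tl.foldl (fun acc n => max acc (PySem.Str.len n)) (PySem.Str.len hd) := by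
      rw [List.map_cons, PySem.List.max?_id_cons, Option.getD_some, List.foldl_map]
    have hMne : tl.foldl (fun acc n => max acc (PySem.Str.len n)) (PySem.Str.len hd) ≠ -1 := by
      have := (PySem.List.le_foldl_max_int tl PySem.Str.len (PySem.Str.len hd)).1
      omega
    rw [lnl_loop]
    simp only [hM0, hmaxA, if_neg hMne, List.nil_append, reduceCtorEq, if_false]
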